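-- pv_equiv track=rewrite | github.com/ilja-jurcenko/hmm-backtrader-sample | experiments/gen_jobs.py | _hmm_args_block
-- ===== SOURCE A (Python) =====
-- def _hmm_args_block(hmm_args: list) -> str:
--     """Format the hmm_args list as continuation lines for the shell command."""
--     if not hmm_args:
--         return "    --regime-mode strict"   # sensible default if no args provided
--     # Pair args and values for cleaner line-wrapping
--     parts = []
--     i = 0
--     while i < len(hmm_args):
--         arg = hmm_args[i]
--         # Collect all values following this flag (until next flag)
--         vals = []
--         i += 1
--         while i < len(hmm_args) and not hmm_args[i].startswith('--'):
--             vals.append(hmm_args[i])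
--             i += 1
--         if vals:
--             parts.append(f'    {arg} {" ".join(vals)}')
--         else:
--             parts.append(f'    {arg}')
--     return ' \\\n'.join(parts)
-- ===== SOURCE B (Python) =====
-- def _hmm_args_block(hmm_args: list) -> str:
--     """Format the hmm_args list as continuation lines for the shell command."""
--     if not hmm_args:
--         return "    --regime-mode strict"
--     groups = []
--     for x in hmm_args:
--         if not groups or x.startswith('--'):
--             groups.append([x])
--         else:
--             groups[-1].append(x)
--     return ' \\\n'.join('    ' + ' '.join(g) for g in groups)
-- ===== Notes on version B (the rewrite author's own statement) =====
-- stated objective: simpler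
-- what changed: Replaces A's index-driven while-loop with a nested value-collection scan and a two-way formatting branch by a single grouping pass (append to groups or to the last group) followed by a uniform ' ' + ' '.join(group) formatting of each group.
import Mathlib
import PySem

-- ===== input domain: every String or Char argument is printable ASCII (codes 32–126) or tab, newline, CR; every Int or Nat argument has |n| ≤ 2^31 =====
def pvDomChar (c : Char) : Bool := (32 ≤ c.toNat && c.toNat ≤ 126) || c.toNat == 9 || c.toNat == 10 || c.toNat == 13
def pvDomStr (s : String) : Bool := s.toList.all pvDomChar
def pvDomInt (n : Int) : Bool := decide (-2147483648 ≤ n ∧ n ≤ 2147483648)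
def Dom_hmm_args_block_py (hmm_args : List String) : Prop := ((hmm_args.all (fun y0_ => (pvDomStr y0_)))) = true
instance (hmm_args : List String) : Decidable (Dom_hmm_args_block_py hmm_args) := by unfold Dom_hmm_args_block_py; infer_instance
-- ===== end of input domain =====

-- B replaces A's index-based while-loop (inner scan collecting values, two-way
-- formatting branch) by one grouping pass plus uniform join-formatting: simpler decomposition.

-- ===== PORT A =====
-- inner while loop: collect values following a flag, returning (vals, new index i)
def pvInnerA (args : List String) (i : Nat) : List String × Nat :=
  if h : i < args.length ∧ PySem.Str.startswith args[i]! "--" = false then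
    let r := pvInnerA args (i + 1)
    (args[i]! :: r.1, r.2)
  else ([], i)
termination_by args.length - i
decreasing_by omega

-- needed for termination of the outer loop: the inner loop never moves i backwards
theorem pvInnerA_ge (args : List String) (i : Nat) : i ≤ (pvInnerA args i).2 := by
  induction i using pvInnerA.induct args with
  | case1 i h ih =>
      rw [pvInnerA, dif_pos h]
      simp only []
      omega
  | case2 i h =>
      rw [pvInnerA, dif_neg h]

-- outer while loop: one part per flag
def pvOuterA (args : List String) (i : Nat) : List String :=
  if _h : i < args.length then
    let arg := args[i]!
    let r := pvInnerA args (i + 1)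
    (if r.1 ≠ [] then "    " ++ arg ++ " " ++ PySem.Str.join " " r.1
     else "    " ++ arg) :: pvOuterA args r.2
  else []
termination_by args.length - i
decreasing_by
  have := pvInnerA_ge args (i + 1); omega

def hmm_args_block_py (hmm_args : List String) : String :=
  if hmm_args = [] then "    --regime-mode strict"
  else PySem.Str.join " \\\n" (pvOuterA hmm_args 0)

-- ===== PORT B =====
-- one step of B's grouping loop: start a new group, or extend the last one
def pvStepB (groups : List (List String)) (x : String) : List (List String) :=
  if groups.isEmpty || PySem.Str.startswith x "--" then groups ++ [[x]]
  else groups.dropLast ++ [groups.getLast! ++ [x]]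

def hmm_args_block_py_alt (hmm_args : List String) : String :=
  if hmm_args = [] then "    --regime-mode strict"
  else
    PySem.Str.join " \\\n"
      ((hmm_args.foldl pvStepB []).map (fun g => "    " ++ PySem.Str.join " " g))

-- ===== PRECONDITION & SPEC =====
def Spec_hmm_args_block_py (hmm_args : List String) (out : String) : Prop := out = hmm_args_block_py_alt hmm_args
instance (hmm_args : List String) (out : String) : Decidable (Spec_hmm_args_block_py hmm_args out) := by unfold Spec_hmm_args_block_py; infer_instance

-- ===== CLAIM (what is proved, stated in full; the proofs are below) =====
def Claim_equal_hmm_args_block_py : Prop := ∀ (hmm_args : List String), Dom_hmm_args_block_py hmm_args → Spec_hmm_args_block_py hmm_args (hmm_args_block_py hmm_args)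

-- ===== LEMMAS AND PROOFS =====

-- the common grouping: head element starts a group, following non-'--' elements join it
def pvG (xs : List String) : List (List String) :=
  match xs with
  | [] => []
  | x :: rest =>
      (x :: rest.takeWhile (fun y => !PySem.Str.startswith y "--")) ::
        pvG (rest.dropWhile (fun y => !PySem.Str.startswith y "--"))
termination_by xs.length
decreasing_by
  simp only [List.length_cons]
  have := List.length_dropWhile_le (fun y => !PySem.Str.startswith y "--") rest
  omega

theorem joinStr_cons (a : String) (vs : List String) :
    PySem.Str.join " " (a :: vs) =
      if vs = [] then a else a ++ " " ++ PySem.Str.join " " vs := by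
  cases vs with
  | nil => simp [PySem.Str.join, PySem.Chars.join_singleton]
  | cons b t =>
      rw [if_neg (List.cons_ne_nil b t)]
      apply String.toList_injective
      simp [PySem.Str.toList_join, PySem.Chars.join_cons_cons]

theorem pvInnerA_eq (args : List String) (i : Nat) :
    pvInnerA args i =
      ((args.drop i).takeWhile (fun y => !PySem.Str.startswith y "--"),
       i + ((args.drop i).takeWhile (fun y => !PySem.Str.startswith y "--")).length) := by
  induction i using pvInnerA.induct args with
  | case1 i h ih =>
      obtain ⟨hlt, hsw⟩ := h
      rw [pvInnerA, dif_pos ⟨hlt, hsw⟩, ih]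
      rw [List.drop_eq_getElem_cons hlt]
      rw [getElem!_pos args i hlt] at hsw ⊢
      simp only [List.takeWhile_cons]
      rw [hsw]
      simp only [Bool.not_false, if_true, Prod.mk.injEq, List.length_cons]
      exact ⟨trivial, by omega⟩
  | case2 i h =>
      rw [pvInnerA, dif_neg h]
      by_cases hlt : i < args.length
      · have hsw : PySem.Str.startswith args[i]! "--" = true := by
          by_contra hc
          exact h ⟨hlt, by simpa using hc⟩
        rw [List.drop_eq_getElem_cons hlt]
        rw [getElem!_pos args i hlt] at hsw
        simp only [List.takeWhile_cons]
        rw [hsw]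
        simp
      · rw [List.drop_eq_nil_of_le (by omega)]
        simp

theorem pvOuterA_eq (args : List String) (i : Nat) (hi : i ≤ args.length) :
    pvOuterA args i = (pvG (args.drop i)).map (fun g => "    " ++ PySem.Str.join " " g) := by
  induction i using pvOuterA.induct args with
  | case1 i hlt r ih =>
      have hr : r = ((args.drop (i+1)).takeWhile (fun y => !PySem.Str.startswith y "--"),
          i + 1 + ((args.drop (i+1)).takeWhile (fun y => !PySem.Str.startswith y "--")).length) :=
        pvInnerA_eq args (i+1)
      rw [pvOuterA, dif_pos hlt]
      rw [pvInnerA_eq args (i+1)]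
      rw [List.drop_eq_getElem_cons hlt, pvG]
      rw [hr] at ih
      rw [getElem!_pos args i hlt]
      simp only [List.map_cons]
      congr 1
      · rw [joinStr_cons]
        cases htw : List.takeWhile (fun y => !PySem.Str.startswith y "--") (List.drop (i + 1) args) with
        | nil => simp
        | cons b t =>
            simp only [List.cons_ne_nil, ne_eq, not_false_iff, if_true]
            apply String.toList_injective
            simp
      · have hb : (List.takeWhile (fun y => !PySem.Str.startswith y "--") (List.drop (i + 1) args)).length
            ≤ args.length - (i + 1) := by
          have h1 := (List.takeWhile_sublist (l := List.drop (i + 1) args)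
            (fun y => !PySem.Str.startswith y "--")).length_le
          simpa using h1
        have h2 : List.drop (i + 1 + (List.takeWhile (fun y => !PySem.Str.startswith y "--") (List.drop (i + 1) args)).length) args
            = List.dropWhile (fun y => !PySem.Str.startswith y "--") (List.drop (i + 1) args) := by
          have h3 : List.drop (List.takeWhile (fun y => !PySem.Str.startswith y "--") (List.drop (i + 1) args)).length
              (List.drop (i + 1) args)
              = List.dropWhile (fun y => !PySem.Str.startswith y "--") (List.drop (i + 1) args) := by
            have h4 : ∀ (l : List String), List.drop (l.takeWhile (fun y => !PySem.Str.startswith y "--")).length l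
                = l.dropWhile (fun y => !PySem.Str.startswith y "--") := by
              intro l
              nth_rewrite 2 [← List.takeWhile_append_dropWhile
                (p := fun y => !PySem.Str.startswith y "--") (l := l)]
              exact List.drop_left
            exact h4 _
          rw [← h3, List.drop_drop]
        rw [← h2]
        exact ih (by omega)
  | case2 i hge =>
      rw [pvOuterA, dif_neg hge, List.drop_eq_nil_of_le (by omega), pvG]
      simp

theorem pvFoldB (xs : List String) (g : List (List String)) (l : List String) :
    List.foldl pvStepB (g ++ [l]) xs =
      g ++ (l ++ xs.takeWhile (fun y => !PySem.Str.startswith y "--")) ::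
        pvG (xs.dropWhile (fun y => !PySem.Str.startswith y "--")) := by
  induction xs generalizing g l with
  | nil => simp [pvG]
  | cons x rest ih =>
      rw [List.foldl_cons]
      by_cases hx : PySem.Str.startswith x "--"
      · have hstep : pvStepB (g ++ [l]) x = (g ++ [l]) ++ [[x]] := by
          have hc : ((g ++ [l]).isEmpty || PySem.Str.startswith x "--") = true := by
            rw [hx]; simp
          unfold pvStepB
          rw [hc]
          simp
        rw [hstep, ih]
        rw [List.takeWhile_cons, List.dropWhile_cons]
        simp only [hx, Bool.not_true, if_false, Bool.false_eq_true]
        rw [pvG]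
        simp
      · have hx' : PySem.Str.startswith x "--" = false := by
          revert hx; cases PySem.Str.startswith x "--" <;> simp
        have hstep : pvStepB (g ++ [l]) x = g ++ [l ++ [x]] := by
          have hc : ((g ++ [l]).isEmpty || PySem.Str.startswith x "--") = false := by
            rw [hx']; simp
          unfold pvStepB
          rw [hc]
          simp
        rw [hstep, ih]
        rw [List.takeWhile_cons, List.dropWhile_cons]
        simp only [hx', Bool.not_false, if_true]
        simp

-- ===== VERDICT (by name: the statement is the Claim_ definition above) =====
theorem hmm_args_block_py_spec : Claim_equal_hmm_args_block_py := by
  intro hmm_args _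
  unfold Spec_hmm_args_block_py hmm_args_block_py hmm_args_block_py_alt
  cases hmm_args with
  | nil => simp
  | cons x rest =>
      rw [if_neg (List.cons_ne_nil x rest), if_neg (List.cons_ne_nil x rest)]
      congr 1
      rw [pvOuterA_eq (x :: rest) 0 (by simp)]
      simp only [List.drop_zero]
      rw [List.foldl_cons]
      have hstep0 : pvStepB [] x = [] ++ [[x]] := by unfold pvStepB; simp
      rw [hstep0, pvFoldB]
      rw [pvG]
      simp
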